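-- pv_equiv track=rewrite | github.com/amol-ship-it/agi-core | domains/arc/primitives.py | recolor_by_nearest_border
-- ===== SOURCE A (Python) =====
-- Grid = list[list[int]]
--
-- def recolor_by_nearest_border(grid: Grid) -> Grid:
--     """Recolor isolated pixels using nearest border stripe color."""
--     if not grid or not grid[0]:
--         return grid
--     h, w = len(grid), len(grid[0])
--     border_rows: dict[int, int] = {}
--     border_cols: dict[int, int] = {}
--     for r in range(h):
--         vals = set(grid[r])
--         if len(vals) == 1 and grid[r][0] != 0:
--             border_rows[r] = grid[r][0]
--     for c in range(w):
--         vals = set(grid[r][c] for r in range(h))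
--         if len(vals) == 1 and grid[0][c] != 0:
--             border_cols[c] = grid[0][c]
--     if not border_rows and not border_cols:
--         return [row[:] for row in grid]
--     border_colors = set(border_rows.values()) | set(border_cols.values())
--     interior_counts: dict[int, int] = {}
--     for r in range(h):
--         for c in range(w):
--             v = grid[r][c]
--             if v != 0 and v not in border_colors:
--                 interior_counts[v] = interior_counts.get(v, 0) + 1
--     if not interior_counts:
--         return [row[:] for row in grid]
--     noise = min(interior_counts, key=lambda k: interior_counts[k])
--     result = [row[:] for row in grid]
--     for r in range(h):
--         for c in range(w):
--             if grid[r][c] == noise: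
--                 best_d = h + w
--                 best_c = noise
--                 for br, bc in border_rows.items():
--                     if abs(r - br) < best_d:
--                         best_d = abs(r - br)
--                         best_c = bc
--                 for ci, cc in border_cols.items():
--                     if abs(c - ci) < best_d:
--                         best_d = abs(c - ci)
--                         best_c = cc
--                 result[r][c] = best_c
--     return result
-- ===== SOURCE B (Python) =====
-- Grid = list[list[int]]
--
-- def recolor_by_nearest_border(grid: Grid) -> Grid:
--     """Recolor isolated pixels using nearest border stripe color.
--
--     Same result as the scan-all-borders version, but the nearest border
--     row/column (distance, color) is precomputed once per row index and per
--     column index, and each noise pixel just combines the two candidates.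
--     """
--     if not grid or not grid[0]:
--         return grid
--     h, w = len(grid), len(grid[0])
--     borders_r = []  # (row index, color) of uniform nonzero rows, in order
--     for r, row in enumerate(grid):
--         if row[0] != 0 and all(x == row[0] for x in row):
--             borders_r.append((r, row[0]))
--     borders_c = []  # (column index, color) of uniform nonzero columns, in order
--     for c in range(w):
--         v0 = grid[0][c]
--         if v0 != 0 and all(row[c] == v0 for row in grid):
--             borders_c.append((c, v0))
--     if not borders_r and not borders_c:
--         return [row[:] for row in grid]
--     border_colors = set(col for _, col in borders_r) | set(col for _, col in borders_c)
--     counts = {}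
--     for row in grid:
--         for v in row[:w]:
--             if v != 0 and v not in border_colors:
--                 counts[v] = counts.get(v, 0) + 1
--     if not counts:
--         return [row[:] for row in grid]
--     noise = min(counts, key=lambda k: counts[k])
--
--     def nearest(borders, x):
--         best = None
--         for i, col in borders:
--             if best is None or abs(x - i) < best[0]:
--                 best = (abs(x - i), col)
--         return best
--
--     near_r = [nearest(borders_r, r) for r in range(h)]
--     near_c = [nearest(borders_c, c) for c in range(w)]
--     result = []
--     for r, row in enumerate(grid):
--         new = row[:]
--         for c in range(w):
--             if row[c] == noise:
--                 pick = near_r[r]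
--                 cb = near_c[c]
--                 if cb is not None and (pick is None or cb[0] < pick[0]):
--                     pick = cb
--                 new[c] = pick[1] if pick is not None else noise
--         result.append(new)
--     return result
-- ===== Notes on version B (the rewrite author's own statement) =====
-- stated objective: alternative
-- what changed: A rescans every border row/column at each noise pixel; B precomputes the nearest border (distance, color) once per row index and per column index and combines the two candidates per pixel, preserving A's first-closest tie order; border detection uses an all-equal scan instead of building a set per row/column.
-- outside the precondition, e.g. on recolor_by_nearest_border([[1, 2], [3]]): A raises IndexError, B raises IndexError
import Mathlib
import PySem

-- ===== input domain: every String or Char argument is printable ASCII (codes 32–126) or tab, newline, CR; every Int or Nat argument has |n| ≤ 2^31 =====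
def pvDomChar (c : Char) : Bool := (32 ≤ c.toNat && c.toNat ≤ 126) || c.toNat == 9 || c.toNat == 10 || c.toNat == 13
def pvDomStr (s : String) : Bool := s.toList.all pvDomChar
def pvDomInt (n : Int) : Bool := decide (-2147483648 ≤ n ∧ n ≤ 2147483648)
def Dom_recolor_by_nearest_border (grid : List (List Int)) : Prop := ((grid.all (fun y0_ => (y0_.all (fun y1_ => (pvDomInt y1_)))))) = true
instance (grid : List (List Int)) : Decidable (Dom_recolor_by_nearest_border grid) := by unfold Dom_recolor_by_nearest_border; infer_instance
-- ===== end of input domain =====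

-- B precomputes the nearest border row/column (distance, color) once per row index and per column
-- index and combines the two candidates per pixel, instead of A's rescan of all border stripes at
-- every noise pixel; return values agree on every grid admitted by Pre_ (neither mutates its input).

-- ===== PORT A =====
-- A: border_rows loop ('vals = set(grid[r]); len(vals) == 1 and grid[r][0] != 0', dict keyed by r)
def pvA_borderRows (grid : List (List Int)) : PySem.Dict Int Int :=
  (PySem.List.pyRange 0 (PySem.List.len grid)).foldl (fun d r =>
    if (PySem.Set.ofList (PySem.List.pyGetD grid r [])).length = 1 ∧
       PySem.List.pyGetD (PySem.List.pyGetD grid r []) 0 0 ≠ 0 then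
      d.insert r (PySem.List.pyGetD (PySem.List.pyGetD grid r []) 0 0)
    else d) PySem.Dict.empty

-- A: border_cols loop ('vals = set(grid[r][c] for r in range(h)); len(vals) == 1 and grid[0][c] != 0')
def pvA_borderCols (grid : List (List Int)) (w : Int) : PySem.Dict Int Int :=
  (PySem.List.pyRange 0 w).foldl (fun d c =>
    if (PySem.Set.ofList ((PySem.List.pyRange 0 (PySem.List.len grid)).map
          (fun r => PySem.List.pyGetD (PySem.List.pyGetD grid r []) c 0))).length = 1 ∧
       PySem.List.pyGetD (PySem.List.pyGetD grid 0 []) c 0 ≠ 0 then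
      d.insert c (PySem.List.pyGetD (PySem.List.pyGetD grid 0 []) c 0)
    else d) PySem.Dict.empty

-- A: interior_counts double loop over indices ('interior_counts[v] = interior_counts.get(v, 0) + 1')
def pvA_counts (grid : List (List Int)) (w : Int) (colors : PySem.Set Int) : PySem.Dict Int Int :=
  (PySem.List.pyRange 0 (PySem.List.len grid)).foldl (fun d r =>
    (PySem.List.pyRange 0 w).foldl (fun d c =>
      if PySem.List.pyGetD (PySem.List.pyGetD grid r []) c 0 ≠ 0 ∧
         PySem.Set.contains colors (PySem.List.pyGetD (PySem.List.pyGetD grid r []) c 0) = false then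
        d.insert (PySem.List.pyGetD (PySem.List.pyGetD grid r []) c 0)
          (d.getD (PySem.List.pyGetD (PySem.List.pyGetD grid r []) c 0) 0 + 1)
      else d) d) PySem.Dict.empty

-- A: one of the two 'for …, … in ….items(): if abs(… - …) < best_d: …' scans (best_d, best_c paired)
def pvA_scan (borders : List (Int × Int)) (x : Int) (s : Int × Int) : Int × Int :=
  borders.foldl (fun s p => if |x - p.1| < s.1 then (|x - p.1|, p.2) else s) s

def recolor_by_nearest_border (grid : List (List Int)) : List (List Int) :=
  if grid = [] ∨ grid.headD [] = [] then grid else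
  let h : Int := PySem.List.len grid
  let w : Int := PySem.List.len (grid.headD [])
  let border_rows := pvA_borderRows grid
  let border_cols := pvA_borderCols grid w
  if border_rows.items = [] ∧ border_cols.items = [] then grid.map (fun row => row) else
  let border_colors := PySem.Set.union (PySem.Set.ofList border_rows.values) border_cols.values
  let interior := pvA_counts grid w border_colors
  if interior.items = [] then grid.map (fun row => row) else
  -- min(interior_counts, key=…); interior is nonempty here, so min? is some and the .getD 0 is unreachable
  let noise := (PySem.List.min? interior.keys (fun k => interior.getD k 0)).getD 0
  -- 'result = [row[:] for row in grid]' then in-place 'result[r][c] = best_c' (copying is the identity on immutable lists)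
  (PySem.List.pyRange 0 h).foldl (fun res r =>
    (PySem.List.pyRange 0 w).foldl (fun res c =>
      if PySem.List.pyGetD (PySem.List.pyGetD grid r []) c 0 = noise then
        res.set r.toNat ((PySem.List.pyGetD res r []).set c.toNat
          (pvA_scan border_cols.items c (pvA_scan border_rows.items r (h + w, noise))).2)
      else res) res) (grid.map (fun row => row))

-- ===== PORT B =====
-- B: 'def nearest(borders, x)' — first strictly-closer border wins, scanning in index order
def pvNearest (borders : List (Int × Int)) (x : Int) : Option (Int × Int) :=
  borders.foldl (fun best p =>
    match best with
    | none => some (|x - p.1|, p.2)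
    | some b => if |x - p.1| < b.1 then some (|x - p.1|, p.2) else some b) none

-- B: borders_r list built with enumerate and an all-equal scan
def pvB_bordersR (grid : List (List Int)) : List (Int × Int) :=
  (PySem.List.enumerate grid).foldl (fun acc p =>
    if PySem.List.pyGetD p.2 0 0 ≠ 0 ∧ p.2.all (fun x => x == PySem.List.pyGetD p.2 0 0) then
      acc ++ [(p.1, PySem.List.pyGetD p.2 0 0)]
    else acc) []

-- B: borders_c list ('all(row[c] == v0 for row in grid)')
def pvB_bordersC (grid : List (List Int)) (w : Int) : List (Int × Int) :=
  (PySem.List.pyRange 0 w).foldl (fun acc c =>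
    if PySem.List.pyGetD (PySem.List.pyGetD grid 0 []) c 0 ≠ 0 ∧
       grid.all (fun row => PySem.List.pyGetD row c 0 == PySem.List.pyGetD (PySem.List.pyGetD grid 0 []) c 0) then
      acc ++ [(c, PySem.List.pyGetD (PySem.List.pyGetD grid 0 []) c 0)]
    else acc) []

-- B: counts loop over the rows themselves ('for v in row[:w]')
def pvB_counts (grid : List (List Int)) (w : Int) (colors : PySem.Set Int) : PySem.Dict Int Int :=
  grid.foldl (fun d row =>
    (PySem.List.slice row none (some w)).foldl (fun d v =>
      if v ≠ 0 ∧ PySem.Set.contains colors v = false then d.insert v (d.getD v 0 + 1) else d) d)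
    PySem.Dict.empty

-- B: 'pick = near_r[r]; if cb is not None and (pick is None or cb[0] < pick[0]): pick = cb'
def pvB_pick (rb cb : Option (Int × Int)) : Option (Int × Int) :=
  match rb, cb with
  | none, cb => cb
  | some rbv, none => some rbv
  | some rbv, some cbv => if cbv.1 < rbv.1 then some cbv else some rbv

def recolor_by_nearest_border_alt (grid : List (List Int)) : List (List Int) :=
  if grid = [] ∨ grid.headD [] = [] then grid else
  let h : Int := PySem.List.len grid
  let w : Int := PySem.List.len (grid.headD [])
  let borders_r := pvB_bordersR grid
  let borders_c := pvB_bordersC grid w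
  if borders_r = [] ∧ borders_c = [] then grid.map (fun row => row) else
  let border_colors := PySem.Set.union (PySem.Set.ofList (borders_r.map (·.2))) (borders_c.map (·.2))
  let counts := pvB_counts grid w border_colors
  if counts.items = [] then grid.map (fun row => row) else
  let noise := (PySem.List.min? counts.keys (fun k => counts.getD k 0)).getD 0
  let near_r := (PySem.List.pyRange 0 h).map (fun r => pvNearest borders_r r)
  let near_c := (PySem.List.pyRange 0 w).map (fun c => pvNearest borders_c c)
  (PySem.List.enumerate grid).foldl (fun res p =>
    res ++ [(PySem.List.pyRange 0 w).foldl (fun nw c =>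
      if PySem.List.pyGetD p.2 c 0 = noise then
        nw.set c.toNat
          (match pvB_pick (PySem.List.pyGetD near_r p.1 none) (PySem.List.pyGetD near_c c none) with
           | some q => q.2
           | none => noise)
      else nw) p.2]) []

-- ===== PRECONDITION & SPEC =====
-- Pre_ excludes grids in which some row is shorter than the first row: there A raises IndexError
-- while building a column set (grid[r][c]).
def Pre_recolor_by_nearest_border (grid : List (List Int)) : Prop :=
  grid = [] ∨ grid.headD [] = [] ∨ ∀ row ∈ grid, (grid.headD []).length ≤ row.length
instance (grid : List (List Int)) : Decidable (Pre_recolor_by_nearest_border grid) := by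
  unfold Pre_recolor_by_nearest_border; infer_instance
def pvWitness_recolor_by_nearest_border : List (List Int) := [[1, 1], [2, 0], [1, 1]]

def Spec_recolor_by_nearest_border (grid : List (List Int)) (out : List (List Int)) : Prop := out = recolor_by_nearest_border_alt grid
instance (grid : List (List Int)) (out : List (List Int)) : Decidable (Spec_recolor_by_nearest_border grid out) := by unfold Spec_recolor_by_nearest_border; infer_instance

-- ===== CLAIM (what is proved, stated in full; the proofs are below) =====
def Claim_equal_recolor_by_nearest_border : Prop := ∀ (grid : List (List Int)), Dom_recolor_by_nearest_border grid → Pre_recolor_by_nearest_border grid → Spec_recolor_by_nearest_border grid (recolor_by_nearest_border grid)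

-- ===== LEMMAS AND PROOFS =====


theorem pv_foldl_add_len (t : List Int) (s : PySem.Set Int) :
    s.length ≤ (t.foldl PySem.Set.add s).length := by
  induction t generalizing s with
  | nil => simp
  | cons x t ih =>
    simp only [List.foldl_cons]
    refine le_trans ?_ (ih (PySem.Set.add s x))
    simp [PySem.Set.add]
    split <;> simp

theorem pv_foldl_add_len_eq (t : List Int) (s : PySem.Set Int) (hs : s ≠ []) :
    ((t.foldl PySem.Set.add s).length = s.length ↔ t.all (fun x => decide (x ∈ s))) := by
  induction t generalizing s with
  | nil => simp
  | cons x t ih =>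
    simp only [List.foldl_cons, List.all_cons]
    by_cases hx : x ∈ s
    · have : PySem.Set.add s x = s := by simp [PySem.Set.add, PySem.Set.contains, hx]
      rw [this, ih s hs]; simp [hx]
    · have hadd : PySem.Set.add s x = s ++ [x] := by simp [PySem.Set.add, PySem.Set.contains, hx]
      rw [hadd]
      have h1 := pv_foldl_add_len t (s ++ [x])
      simp only [List.length_append, List.length_singleton] at h1
      constructor
      · intro h; omega
      · intro h; simp [hx] at h

theorem pv_set_len_one (l : List Int) :
    ((PySem.Set.ofList l).length = 1 ↔ l ≠ [] ∧ l.all (fun x => x == l.headD 0) = true) := by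
  cases l with
  | nil => simp [PySem.Set.ofList]
  | cons a t =>
    have h0 : PySem.Set.ofList (a :: t) = t.foldl PySem.Set.add [a] := by
      rw [PySem.Set.ofList_eq_foldl]; rfl
    rw [h0]
    have := pv_foldl_add_len_eq t [a] (by simp)
    simp only [List.length_singleton] at this
    rw [this]
    simp [List.all_cons]

theorem pv_row_cond (row : List Int) :
    ((PySem.Set.ofList row).length = 1 ∧ PySem.List.pyGetD row 0 0 ≠ 0
      ↔ PySem.List.pyGetD row 0 0 ≠ 0 ∧ row.all (fun x => x == PySem.List.pyGetD row 0 0) = true) := by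
  cases row with
  | nil => simp [PySem.Set.ofList, PySem.List.pyGetD, PySem.List.pyGet?]
  | cons a t =>
    have h : PySem.List.pyGetD (a :: t) 0 0 = a := by simp [pysem]
    rw [h, pv_set_len_one]
    simp [and_comm]

theorem pv_bordersR_char (grid : List (List Int)) :
  pvB_bordersR grid =
    (((PySem.List.pyRange 0 (PySem.List.len grid)).filter
      (fun r => decide (PySem.List.pyGetD (PySem.List.pyGetD grid r []) 0 0 ≠ 0 ∧
        (PySem.List.pyGetD grid r []).all (fun x => x == PySem.List.pyGetD (PySem.List.pyGetD grid r []) 0 0)))).map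
      (fun r => (r, PySem.List.pyGetD (PySem.List.pyGetD grid r []) 0 0))) := by
  unfold pvB_bordersR
  rw [PySem.List.enumerate_eq_map_pyRange grid [], List.foldl_map]
  have h2 := PySem.List.foldl_ite_eq_foldl_filter
      (p := fun r => PySem.List.pyGetD (PySem.List.pyGetD grid r []) 0 0 ≠ 0 ∧
        (PySem.List.pyGetD grid r []).all (fun x => x == PySem.List.pyGetD (PySem.List.pyGetD grid r []) 0 0) = true)
      (f := fun (acc : List (Int × Int)) r => acc ++ [(r, PySem.List.pyGetD (PySem.List.pyGetD grid r []) 0 0)])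
      (l := PySem.List.pyRange 0 (PySem.List.len grid)) (init := ([] : List (Int × Int)))
  refine Eq.trans h2 ?_
  rw [PySem.List.foldl_append_singleton_eq_map
        (f := fun r => (r, PySem.List.pyGetD (PySem.List.pyGetD grid r []) 0 0))]
  simp

theorem pv_bordersR_items (grid : List (List Int)) :
    (pvA_borderRows grid).items = pvB_bordersR grid := by
  have hA : (pvA_borderRows grid).items =
      (((PySem.List.pyRange 0 (PySem.List.len grid)).filter
        (fun r => decide ((PySem.Set.ofList (PySem.List.pyGetD grid r [])).length = 1 ∧
            PySem.List.pyGetD (PySem.List.pyGetD grid r []) 0 0 ≠ 0))).map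
        (fun r => (r, PySem.List.pyGetD (PySem.List.pyGetD grid r []) 0 0))) := by
    have h1 : pvA_borderRows grid = (((PySem.List.pyRange 0 (PySem.List.len grid)).filter
        (fun r => decide ((PySem.Set.ofList (PySem.List.pyGetD grid r [])).length = 1 ∧
            PySem.List.pyGetD (PySem.List.pyGetD grid r []) 0 0 ≠ 0))).foldl
        (fun d r => d.insert r (PySem.List.pyGetD (PySem.List.pyGetD grid r []) 0 0)) PySem.Dict.empty) := by
      unfold pvA_borderRows
      exact PySem.List.foldl_ite_eq_foldl_filter
        (p := fun r => (PySem.Set.ofList (PySem.List.pyGetD grid r [])).length = 1 ∧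
          PySem.List.pyGetD (PySem.List.pyGetD grid r []) 0 0 ≠ 0)
        (f := fun (d : PySem.Dict Int Int) r => d.insert r (PySem.List.pyGetD (PySem.List.pyGetD grid r []) 0 0))
        (l := PySem.List.pyRange 0 (PySem.List.len grid)) (init := PySem.Dict.empty)
    rw [h1]
    rw [PySem.Dict.items_foldl_insert_fresh _ (fun r => r)
          (fun r => PySem.List.pyGetD (PySem.List.pyGetD grid r []) 0 0) PySem.Dict.empty
          (by intro a _; simp [pysem])
          (by simpa using (PySem.List.nodup_pyRange_one (a := 0) (b := PySem.List.len grid)).filter _)]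
    simp [PySem.Dict.empty]
  have hB := pv_bordersR_char grid
  rw [hA, hB]
  congr 1
  apply List.filter_congr
  intro r _
  simp only [decide_eq_decide]
  exact pv_row_cond _

theorem pv_col_eq (grid : List (List Int)) (c : Int) :
    (PySem.List.pyRange 0 (PySem.List.len grid)).map
        (fun r => PySem.List.pyGetD (PySem.List.pyGetD grid r []) c 0)
      = grid.map (fun row => PySem.List.pyGetD row c 0) := by
  have : (fun r => PySem.List.pyGetD (PySem.List.pyGetD grid r []) c 0)
      = (fun row => PySem.List.pyGetD row c 0) ∘ (fun r => PySem.List.pyGetD grid r []) := rfl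
  rw [this, ← List.map_map, PySem.List.map_pyGetD_pyRange_zero]

theorem pv_col_cond (grid : List (List Int)) (c : Int) :
    ((PySem.Set.ofList ((PySem.List.pyRange 0 (PySem.List.len grid)).map
          (fun r => PySem.List.pyGetD (PySem.List.pyGetD grid r []) c 0))).length = 1 ∧
       PySem.List.pyGetD (PySem.List.pyGetD grid 0 []) c 0 ≠ 0
     ↔ PySem.List.pyGetD (PySem.List.pyGetD grid 0 []) c 0 ≠ 0 ∧
       grid.all (fun row => PySem.List.pyGetD row c 0 == PySem.List.pyGetD (PySem.List.pyGetD grid 0 []) c 0) = true) := by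
  rw [pv_col_eq, pv_set_len_one]
  cases grid with
  | nil => simp [PySem.List.pyGetD, PySem.List.pyGet?]
  | cons g0 gs =>
    have h0 : PySem.List.pyGetD (g0 :: gs) 0 [] = g0 := by simp [pysem]
    rw [h0]
    simp only [List.map_cons, List.headD_cons, List.all_map, ne_eq, List.cons_ne_nil,
      not_false_eq_true, true_and, List.all_cons]
    rw [and_comm]
    simp

theorem pv_bordersC_char (grid : List (List Int)) (w : Int) :
  pvB_bordersC grid w =
    (((PySem.List.pyRange 0 w).filter
      (fun c => decide (PySem.List.pyGetD (PySem.List.pyGetD grid 0 []) c 0 ≠ 0 ∧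
        grid.all (fun row => PySem.List.pyGetD row c 0 == PySem.List.pyGetD (PySem.List.pyGetD grid 0 []) c 0) = true))).map
      (fun c => (c, PySem.List.pyGetD (PySem.List.pyGetD grid 0 []) c 0))) := by
  unfold pvB_bordersC
  have h2 := PySem.List.foldl_ite_eq_foldl_filter
      (p := fun c => PySem.List.pyGetD (PySem.List.pyGetD grid 0 []) c 0 ≠ 0 ∧
        grid.all (fun row => PySem.List.pyGetD row c 0 == PySem.List.pyGetD (PySem.List.pyGetD grid 0 []) c 0) = true)
      (f := fun (acc : List (Int × Int)) c => acc ++ [(c, PySem.List.pyGetD (PySem.List.pyGetD grid 0 []) c 0)])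
      (l := PySem.List.pyRange 0 w) (init := ([] : List (Int × Int)))
  refine Eq.trans h2 ?_
  rw [PySem.List.foldl_append_singleton_eq_map
        (f := fun c => (c, PySem.List.pyGetD (PySem.List.pyGetD grid 0 []) c 0))]
  simp

theorem pv_bordersC_items (grid : List (List Int)) (w : Int) :
    (pvA_borderCols grid w).items = pvB_bordersC grid w := by
  have hA : (pvA_borderCols grid w).items =
      (((PySem.List.pyRange 0 w).filter
        (fun c => decide ((PySem.Set.ofList ((PySem.List.pyRange 0 (PySem.List.len grid)).map
            (fun r => PySem.List.pyGetD (PySem.List.pyGetD grid r []) c 0))).length = 1 ∧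
          PySem.List.pyGetD (PySem.List.pyGetD grid 0 []) c 0 ≠ 0))).map
        (fun c => (c, PySem.List.pyGetD (PySem.List.pyGetD grid 0 []) c 0))) := by
    have h1 : pvA_borderCols grid w = (((PySem.List.pyRange 0 w).filter
        (fun c => decide ((PySem.Set.ofList ((PySem.List.pyRange 0 (PySem.List.len grid)).map
            (fun r => PySem.List.pyGetD (PySem.List.pyGetD grid r []) c 0))).length = 1 ∧
          PySem.List.pyGetD (PySem.List.pyGetD grid 0 []) c 0 ≠ 0))).foldl
        (fun d c => d.insert c (PySem.List.pyGetD (PySem.List.pyGetD grid 0 []) c 0)) PySem.Dict.empty) := by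
      unfold pvA_borderCols
      exact PySem.List.foldl_ite_eq_foldl_filter
        (p := fun c => (PySem.Set.ofList ((PySem.List.pyRange 0 (PySem.List.len grid)).map
            (fun r => PySem.List.pyGetD (PySem.List.pyGetD grid r []) c 0))).length = 1 ∧
          PySem.List.pyGetD (PySem.List.pyGetD grid 0 []) c 0 ≠ 0)
        (f := fun (d : PySem.Dict Int Int) c => d.insert c (PySem.List.pyGetD (PySem.List.pyGetD grid 0 []) c 0))
        (l := PySem.List.pyRange 0 w) (init := PySem.Dict.empty)
    rw [h1]
    rw [PySem.Dict.items_foldl_insert_fresh _ (fun c => c)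
          (fun c => PySem.List.pyGetD (PySem.List.pyGetD grid 0 []) c 0) PySem.Dict.empty
          (by intro a _; simp [pysem])
          (by simpa using (PySem.List.nodup_pyRange_one (a := 0) (b := w)).filter _)]
    simp [PySem.Dict.empty]
  have hB := pv_bordersC_char grid w
  rw [hA, hB]
  congr 1
  apply List.filter_congr
  intro c _
  simp only [decide_eq_decide]
  exact pv_col_cond grid c

theorem pv_counts_eq (grid : List (List Int)) (w : Int) (colors : PySem.Set Int)
    (hw : 0 ≤ w) (hlen : ∀ row ∈ grid, w.toNat ≤ row.length) :
    pvA_counts grid w colors = pvB_counts grid w colors := by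
  unfold pvA_counts pvB_counts
  refine Eq.trans (PySem.List.foldl_pyRange_zero_pyGetD grid []
      (fun d row => (PySem.List.pyRange 0 w).foldl (fun d c =>
        if PySem.List.pyGetD row c 0 ≠ 0 ∧
           PySem.Set.contains colors (PySem.List.pyGetD row c 0) = false then
          d.insert (PySem.List.pyGetD row c 0) (d.getD (PySem.List.pyGetD row c 0) 0 + 1)
        else d) d) (PySem.Dict.empty : PySem.Dict Int Int)) ?_
  apply PySem.List.foldl_congr_mem
  intro d row hrow
  have hr := hlen row hrow
  rw [PySem.List.slice_to row hw]
  -- replace row lookups by lookups in row.take w.toNat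
  have hconv : ∀ (d : PySem.Dict Int Int), ∀ c ∈ PySem.List.pyRange 0 w,
      (if PySem.List.pyGetD row c 0 ≠ 0 ∧
           PySem.Set.contains colors (PySem.List.pyGetD row c 0) = false then
          d.insert (PySem.List.pyGetD row c 0) (d.getD (PySem.List.pyGetD row c 0) 0 + 1)
        else d)
      = (if PySem.List.pyGetD (row.take w.toNat) c 0 ≠ 0 ∧
           PySem.Set.contains colors (PySem.List.pyGetD (row.take w.toNat) c 0) = false then
          d.insert (PySem.List.pyGetD (row.take w.toNat) c 0)
            (d.getD (PySem.List.pyGetD (row.take w.toNat) c 0) 0 + 1)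
        else d) := by
    intro d c hc
    rw [PySem.List.mem_pyRange_one] at hc
    have h1 : PySem.List.pyGetD (row.take w.toNat) c 0 = PySem.List.pyGetD row c 0 := by
      rw [PySem.List.pyGetD_eq_getElem _ _ hc.1 (by simp; omega),
          PySem.List.pyGetD_eq_getElem _ _ hc.1 (by have := hlen row hrow; omega)]
      simp [List.getElem_take]
    rw [h1]
  have hlw : PySem.List.len (row.take w.toNat) = w := by
    rw [PySem.List.len_eq]; simp; omega
  have hfin := PySem.List.foldl_pyRange_zero_pyGetD (row.take w.toNat) 0
      (fun d v => if v ≠ 0 ∧ PySem.Set.contains colors v = false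
        then d.insert v (d.getD v 0 + 1) else d) d
  rw [hlw] at hfin
  exact Eq.trans (PySem.List.foldl_congr_mem _ _ _ _ hconv) hfin

theorem pv_scan_cons (p : Int × Int) (t : List (Int × Int)) (x : Int) (s : Int × Int) :
    pvA_scan (p :: t) x s = pvA_scan t x (if |x - p.1| < s.1 then (|x - p.1|, p.2) else s) := rfl

theorem pv_scan_cases (l : List (Int × Int)) (x : Int) (s : Int × Int) :
    pvA_scan l x s = s ∨ ∃ p ∈ l, pvA_scan l x s = (|x - p.1|, p.2) := by
  induction l generalizing s with
  | nil => left; rfl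
  | cons q t ih =>
    rw [pv_scan_cons]
    by_cases h : |x - q.1| < s.1
    · rw [if_pos h]
      rcases ih (|x - q.1|, q.2) with h1 | ⟨p, hp, h1⟩
      · right; exact ⟨q, by simp, h1⟩
      · right; exact ⟨p, by simp [hp], h1⟩
    · rw [if_neg h]
      rcases ih s with h1 | ⟨p, hp, h1⟩
      · left; exact h1
      · right; exact ⟨p, by simp [hp], h1⟩

theorem pv_nearest_eq_scan (p : Int × Int) (t : List (Int × Int)) (x : Int) :
    pvNearest (p :: t) x = some (pvA_scan t x (|x - p.1|, p.2)) := by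
  show t.foldl _ (some (|x - p.1|, p.2)) = _
  suffices h : ∀ (b : Int × Int), t.foldl (fun best p =>
      match best with
      | none => some (|x - p.1|, p.2)
      | some b => if |x - p.1| < b.1 then some (|x - p.1|, p.2) else some b) (some b)
      = some (pvA_scan t x b) by exact h _
  induction t with
  | nil => intro b; rfl
  | cons q t ih =>
    intro b
    simp only [List.foldl_cons, pv_scan_cons]
    by_cases h : |x - q.1| < b.1
    · simp only [if_pos h]; exact ih _
    · simp only [if_neg h]; exact ih _

theorem pv_scan_eq_nearest (l : List (Int × Int)) (x : Int) (s : Int × Int) :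
    pvA_scan l x s = (match pvNearest l x with
      | none => s
      | some b => if b.1 < s.1 then b else s) := by
  induction l generalizing s with
  | nil => rfl
  | cons p t ih =>
    rw [pv_scan_cons, pv_nearest_eq_scan]
    rw [ih (if |x - p.1| < s.1 then (|x - p.1|, p.2) else s)]
    have hd := ih ((|x - p.1|, p.2))
    cases hn : pvNearest t x with
    | none =>
      rw [hn] at hd
      simp only [hd]
    | some b =>
      rw [hn] at hd
      simp only [hd]
      split_ifs <;> simp_all <;> omega

theorem pv_nearest_cases (l : List (Int × Int)) (x : Int) (b : Int × Int)
    (h : pvNearest l x = some b) : ∃ p ∈ l, b.1 = |x - p.1| := by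
  cases l with
  | nil => simp [pvNearest] at h
  | cons q t =>
    rw [pv_nearest_eq_scan] at h
    have hb : b = pvA_scan t x (|x - q.1|, q.2) := (Option.some.inj h).symm
    rcases pv_scan_cases t x (|x - q.1|, q.2) with h1 | ⟨p, hp, h1⟩
    · exact ⟨q, by simp, by rw [hb, h1]⟩
    · exact ⟨p, by simp [hp], by rw [hb, h1]⟩

theorem pv_pick_eq (br bc : List (Int × Int)) (r c H noise : Int)
    (hbr : ∀ p ∈ br, |r - p.1| < H) (hbc : ∀ p ∈ bc, |c - p.1| < H) :
    (pvA_scan bc c (pvA_scan br r (H, noise))).2 =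
      (match pvB_pick (pvNearest br r) (pvNearest bc c) with
       | some q => q.2
       | none => noise) := by
  rw [pv_scan_eq_nearest, pv_scan_eq_nearest]
  cases hr : pvNearest br r with
  | none =>
    cases hc : pvNearest bc c with
    | none => rfl
    | some b =>
      obtain ⟨p, hp, hb⟩ := pv_nearest_cases _ _ _ hc
      have hH := hbc p hp
      show (if b.1 < (H, noise).1 then b else (H, noise)).2 = b.2
      rw [if_pos (by simp; omega)]
  | some b =>
    obtain ⟨p, hp, hb⟩ := pv_nearest_cases _ _ _ hr
    have hbH := hbr p hp
    have hs1 : (if b.1 < (H, noise).1 then b else (H, noise)) = b := by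
      rw [if_pos (by simp; omega)]
    cases hc : pvNearest bc c with
    | none =>
      show (if b.1 < (H, noise).1 then b else (H, noise)).2 = b.2
      rw [hs1]
    | some b' =>
      show (if b'.1 < (if b.1 < (H, noise).1 then b else (H, noise)).1 then b'
            else (if b.1 < (H, noise).1 then b else (H, noise))).2
          = (match (if b'.1 < b.1 then some b' else some b) with
             | some q => q.2 | none => noise)
      rw [hs1]
      by_cases h2 : b'.1 < b.1
      · rw [if_pos h2, if_pos h2]
      · rw [if_neg h2, if_neg h2]

theorem pv_mid_get (done rest : List (List Int)) (row : List Int) :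
    PySem.List.pyGetD (done ++ row :: rest) (done.length : Int) [] = row := by
  rw [PySem.List.pyGetD_eq_getElem _ _ (by positivity) (by simp)]
  simp [List.getElem_append_right]

theorem pv_mid_set (done rest : List (List Int)) (row x : List Int) :
    (done ++ row :: rest).set done.length x = done ++ x :: rest := by
  rw [List.set_append]
  simp

theorem pv_set_fold (cs : List Int) (P : Int → Prop) [DecidablePred P] (g : Int → Int) :
    ∀ (row : List Int) (done rest : List (List Int)) (r : Int), r = (done.length : Int) →
    cs.foldl (fun res c => if P c then
        res.set r.toNat ((PySem.List.pyGetD res r []).set c.toNat (g c)) else res)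
      (done ++ row :: rest)
    = done ++ (cs.foldl (fun nw c => if P c then nw.set c.toNat (g c) else nw) row) :: rest := by
  induction cs with
  | nil => intro row done rest r hr; rfl
  | cons c cs ih =>
    intro row done rest r hr
    simp only [List.foldl_cons]
    by_cases h : P c
    · rw [if_pos h, if_pos h, hr, pv_mid_get]
      have ht : ((done.length : Int)).toNat = done.length := by omega
      rw [ht, pv_mid_set]
      exact ih _ done rest _ rfl
    · rw [if_neg h, if_neg h]
      exact ih _ done rest _ hr

theorem pv_outer_fold' (w noise : Int) (grid : List (List Int)) (g : Int → Int → Int) :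
    ∀ (xs done : List (List Int)) (a b : Int), a = (done.length : Int) →
      b = a + (xs.length : Int) →
    (PySem.List.pyRange a b).foldl
      (fun res r => (PySem.List.pyRange 0 w).foldl (fun res c =>
        if PySem.List.pyGetD (PySem.List.pyGetD grid r []) c 0 = noise then
          res.set r.toNat ((PySem.List.pyGetD res r []).set c.toNat (g r c))
        else res) res) (done ++ xs)
    = done ++ (PySem.List.enumerate xs a).map (fun p =>
        (PySem.List.pyRange 0 w).foldl (fun nw c =>
          if PySem.List.pyGetD (PySem.List.pyGetD grid p.1 []) c 0 = noise then
            nw.set c.toNat (g p.1 c)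
          else nw) p.2) := by
  intro xs
  induction xs with
  | nil =>
    intro done a b ha hb
    rw [PySem.List.pyRange_one_eq_nil (a := a) (b := b) (by simp at hb; omega)]
    simp [PySem.List.enumerate_nil]
  | cons x t ih =>
    intro done a b ha hb
    have hc : ((x :: t).length : Int) = (t.length : Int) + 1 := by simp
    rw [PySem.List.pyRange_one_cons (a := a) (b := b) (by omega)]
    simp only [List.foldl_cons]
    rw [pv_set_fold _ (fun c => PySem.List.pyGetD (PySem.List.pyGetD grid a []) c 0 = noise)
        (fun c => g a c) x done t a ha]
    rw [show done ++ (List.foldl (fun nw c => if PySem.List.pyGetD (PySem.List.pyGetD grid a []) c 0 = noise then nw.set c.toNat (g a c) else nw) x (PySem.List.pyRange 0 w)) :: t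
        = (done ++ [(List.foldl (fun nw c => if PySem.List.pyGetD (PySem.List.pyGetD grid a []) c 0 = noise then nw.set c.toNat (g a c) else nw) x (PySem.List.pyRange 0 w))]) ++ t from by simp]
    rw [ih _ (a + 1) b (by simp [ha]) (by omega)]
    rw [PySem.List.enumerate_cons]
    simp

theorem pv_bordersR_bound (grid : List (List Int)) (p : Int × Int)
    (h : p ∈ pvB_bordersR grid) : 0 ≤ p.1 ∧ p.1 < (grid.length : Int) := by
  rw [pv_bordersR_char] at h
  obtain ⟨r, hr, rfl⟩ := List.mem_map.1 h
  have h1 := (List.mem_filter.1 hr).1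
  rw [PySem.List.len_eq] at h1
  have h2 := PySem.List.mem_pyRange_one.1 h1
  exact ⟨h2.1, h2.2⟩

theorem pv_bordersC_bound (grid : List (List Int)) (w : Int) (p : Int × Int)
    (h : p ∈ pvB_bordersC grid w) : 0 ≤ p.1 ∧ p.1 < w := by
  rw [pv_bordersC_char] at h
  obtain ⟨c, hc, rfl⟩ := List.mem_map.1 h
  have h1 := (List.mem_filter.1 hc).1
  have h2 := PySem.List.mem_pyRange_one.1 h1
  exact ⟨h2.1, h2.2⟩

-- ===== VERDICT (by name: the statement is the Claim_ definition above) =====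
theorem recolor_by_nearest_border_spec : Claim_equal_recolor_by_nearest_border := by
  unfold Claim_equal_recolor_by_nearest_border
  intro grid _ hpre
  unfold Spec_recolor_by_nearest_border
  unfold recolor_by_nearest_border recolor_by_nearest_border_alt
  by_cases h0 : grid = [] ∨ grid.headD [] = []
  · rw [if_pos h0, if_pos h0]
  · rw [if_neg h0, if_neg h0]
    simp only [PySem.List.len_eq]
    rw [← pv_bordersR_items grid, ← pv_bordersC_items grid (((grid.headD []).length : Nat) : Int)]
    push_neg at h0
    have hg1 : 1 ≤ grid.length := List.length_pos_iff.2 h0.1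
    have hw1 : 1 ≤ (grid.headD []).length := List.length_pos_iff.2 h0.2
    have hw : (0:Int) ≤ (((grid.headD []).length : Nat) : Int) := by positivity
    have hlen : ∀ row ∈ grid, ((((grid.headD []).length : Nat) : Int)).toNat ≤ row.length := by
      intro row hr
      rcases hpre with h | h | h
      · exact absurd h h0.1
      · exact absurd h h0.2
      · simpa using h row hr
    rw [← pv_counts_eq grid (((grid.headD []).length : Nat) : Int) _ hw hlen]
    simp only [PySem.Dict.values]
    have hbrB : ∀ p ∈ (pvA_borderRows grid).items, 0 ≤ p.1 ∧ p.1 < (grid.length : Int) := by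
      rw [pv_bordersR_items]; exact pv_bordersR_bound grid
    have hbcB : ∀ p ∈ (pvA_borderCols grid (((grid.headD []).length : Nat) : Int)).items,
        0 ≤ p.1 ∧ p.1 < (((grid.headD []).length : Nat) : Int) := by
      rw [pv_bordersC_items]; exact pv_bordersC_bound grid _
    set W : Int := (((grid.headD []).length : Nat) : Int) with hW
    set BR : List (Int × Int) := (pvA_borderRows grid).items with hBR
    set BC : List (Int × Int) := (pvA_borderCols grid W).items with hBC
    set CNT : PySem.Dict Int Int := pvA_counts grid W
      ((PySem.Set.ofList (List.map (fun x => x.2) BR)).union (List.map (fun x => x.2) BC)) with hCNT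
    by_cases h1 : BR = [] ∧ BC = []
    · rw [if_pos h1, if_pos h1]
    · rw [if_neg h1, if_neg h1]
      by_cases h2 : CNT.items = []
      · rw [if_pos h2, if_pos h2]
      · rw [if_neg h2, if_neg h2]
        set NS : Int := (PySem.List.min? CNT.keys fun k => CNT.getD k 0).getD 0 with hNS
        have hAf := pv_outer_fold' W NS grid
          (fun r c => (pvA_scan BC c (pvA_scan BR r ((grid.length : Int) + W, NS))).2)
          grid [] 0 ((grid.length : Nat) : Int) (by simp) (by simp)
        simp only [List.nil_append] at hAf
        rw [List.map_id']
        rw [hAf]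
        have hBf := PySem.List.foldl_append_singleton_eq_map
          (f := fun p : Int × List Int => (PySem.List.pyRange 0 W).foldl (fun nw c =>
            if PySem.List.pyGetD p.2 c 0 = NS then
              nw.set c.toNat (match pvB_pick
                (PySem.List.pyGetD (List.map (fun r => pvNearest BR r)
                  (PySem.List.pyRange 0 ((grid.length : Nat) : Int))) p.1 none)
                (PySem.List.pyGetD (List.map (fun c => pvNearest BC c)
                  (PySem.List.pyRange 0 W)) c none) with
               | some x => x.2
               | none => NS)
            else nw) p.2)
          (l := PySem.List.enumerate grid) (acc := ([] : List (List Int)))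
        simp only [List.nil_append] at hBf
        rw [hBf]
        apply List.map_congr_left
        intro p hp
        obtain ⟨k, hk, rfl⟩ := (PySem.List.mem_enumerate_iff grid 0 p).1 hp
        simp only [zero_add]
        have hrow : PySem.List.pyGetD grid (k : Int) [] = grid[k] :=
          PySem.List.pyGetD_eq_getElem _ _ (by positivity) (by exact_mod_cast hk)
        rw [hrow]
        apply PySem.List.foldl_congr_mem
        intro nw c hc
        have hc' := PySem.List.mem_pyRange_one.1 hc
        rw [hW] at hc'
        by_cases hpix : PySem.List.pyGetD grid[k] c 0 = NS
        · rw [if_pos hpix, if_pos hpix]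
          congr 1
          have hl1 : PySem.List.pyGetD (List.map (fun r => pvNearest BR r)
              (PySem.List.pyRange 0 ((grid.length : Nat) : Int))) (k : Int) none
              = pvNearest BR (k : Int) :=
            PySem.List.pyGetD_map_pyRange (fun r => pvNearest BR r) grid.length k none hk
          have hcc : ((c.toNat : Nat) : Int) = c := Int.toNat_of_nonneg hc'.1
          have hl2 := PySem.List.pyGetD_map_pyRange (fun c => pvNearest BC c)
            (grid.headD []).length c.toNat none (by omega)
          rw [hcc] at hl2
          rw [← hW] at hl2
          rw [hl1, hl2]
          exact pv_pick_eq BR BC (k : Int) c ((grid.length : Int) + W) NS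
            (by intro q hq; have h3 := hbrB q hq; rw [hW, abs_sub_lt_iff]; omega)
            (by intro q hq; have h3 := hbcB q hq; rw [hW, abs_sub_lt_iff]; omega)
        · rw [if_neg hpix, if_neg hpix]
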